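-- pv_equiv track=rewrite | github.com/VovaGul/billing | test_.py | look_matches
-- ===== SOURCE A (Python) =====
-- def look_matches(ans, r_answer):
--     iter_right = iter(r_answer)
--     iter_ans = iter(ans)
--     for elem in iter_right:
--         for word in iter_ans:
--             if word == elem:
--                 break
--         else:
--             return [w for w in iter_right]
-- ===== SOURCE B (Python) =====
-- def look_matches(ans, r_answer):
--     # Build an inverted index once: word -> list of its positions in ans (ascending).
--     occ = {}
--     for i, w in enumerate(ans):
--         occ.setdefault(w, []).append(i)
--     # Greedy subsequence match by position lookups in the index.
--     pos = 0
--     for k, elem in enumerate(r_answer):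
--         hit = None
--         for i in occ.get(elem, ()):
--             if i >= pos:
--                 hit = i
--                 break
--         if hit is None:
--             return r_answer[k + 1:]
--         pos = hit + 1
--     return None
-- ===== Notes on version B (the rewrite author's own statement) =====
-- stated objective: alternative
-- what changed: B precomputes an inverted index (dict word -> ascending positions in ans) in one pass and then matches r_answer greedily by position lookups in that index, instead of A's nested for-else loops consuming shared iterators over ans.
import Mathlib
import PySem

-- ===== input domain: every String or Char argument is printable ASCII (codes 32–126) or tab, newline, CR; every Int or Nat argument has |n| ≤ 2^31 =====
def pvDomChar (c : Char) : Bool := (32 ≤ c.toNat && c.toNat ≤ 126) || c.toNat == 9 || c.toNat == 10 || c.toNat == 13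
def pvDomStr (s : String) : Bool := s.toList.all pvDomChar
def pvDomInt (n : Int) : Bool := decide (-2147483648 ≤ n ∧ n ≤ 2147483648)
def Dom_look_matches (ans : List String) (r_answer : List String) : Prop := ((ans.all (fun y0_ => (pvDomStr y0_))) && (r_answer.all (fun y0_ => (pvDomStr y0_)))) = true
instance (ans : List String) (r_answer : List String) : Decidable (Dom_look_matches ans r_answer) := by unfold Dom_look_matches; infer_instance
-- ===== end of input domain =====

-- B builds an inverted index (word -> ascending positions in ans) once, then matches r_answer greedily via indexed lookups — an alternative algorithm of similar cost.



-- ===== PORT A =====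
-- inner 'for word in iter_ans: if word == elem: break' — the ans-iterator remainder after the match, or none if exhausted
def lookConsume (ans : List String) (elem : String) : Option (List String) :=
  match ans with
  | [] => none
  | w :: ws => if w = elem then some ws else lookConsume ws elem

def look_matches (ans : List String) (r_answer : List String) : Option (List String) :=
  match r_answer with
  | [] => none
  | elem :: rest =>
    match lookConsume ans elem with
    | some ans' => look_matches ans' rest
    | none => some rest

-- ===== PORT B =====
-- occ = {}; for i, w in enumerate(ans): occ.setdefault(w, []).append(i)
def lookOcc (ans : List String) : PySem.Dict String (List Int) :=
  (PySem.List.enumerate ans 0).foldl (fun d p => d.modify p.2 [] (fun l => l ++ [p.1])) PySem.Dict.empty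

-- for i in occ.get(elem, ()): if i >= pos: hit = i; break
def lookFirstGE (idxs : List Int) (pos : Int) : Option Int :=
  match idxs with
  | [] => none
  | i :: is => if pos ≤ i then some i else lookFirstGE is pos

-- for k, elem in enumerate(r_answer): … return r_answer[k+1:] on miss (rest = r_answer[k+1:])
def lookLoop (occ : PySem.Dict String (List Int)) (r : List String) (pos : Int) : Option (List String) :=
  match r with
  | [] => none
  | e :: rest =>
    match lookFirstGE (occ.getD e []) pos with
    | none => some rest
    | some i => lookLoop occ rest (i + 1)

def look_matches_alt (ans : List String) (r_answer : List String) : Option (List String) :=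
  lookLoop (lookOcc ans) r_answer 0

-- ===== PRECONDITION & SPEC =====
def Spec_look_matches (ans : List String) (r_answer : List String) (out : Option (List String)) : Prop := out = look_matches_alt ans r_answer
instance (ans : List String) (r_answer : List String) (out : Option (List String)) : Decidable (Spec_look_matches ans r_answer out) := by unfold Spec_look_matches; infer_instance

-- ===== CLAIM =====
def Claim_equal_look_matches : Prop := ∀ (ans : List String) (r_answer : List String), Dom_look_matches ans r_answer → Spec_look_matches ans r_answer (look_matches ans r_answer)

-- ===== LEMMAS AND PROOFS =====
-- positions (from index n) of e in xs, ascending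
def occFrom (n : Int) (xs : List String) (e : String) : List Int :=
  match xs with
  | [] => []
  | w :: ws => (if w = e then [n] else []) ++ occFrom (n + 1) ws e

theorem fold_getD (l : List (Int × String)) (d : PySem.Dict String (List Int)) (e : String) :
    ((l.foldl (fun d p => d.modify p.2 [] (fun l => l ++ [p.1])) d).getD e [])
      = d.getD e [] ++ l.filterMap (fun p => if p.2 = e then some p.1 else none) := by
  induction l generalizing d with
  | nil => simp
  | cons p l ih =>
    simp only [List.foldl_cons, ih, List.filterMap_cons, PySem.Dict.getD_modify]
    by_cases h : p.2 = e
    · simp [h]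
    · simp [h, Ne.symm h]

theorem filterMap_enumerate (xs : List String) (s : Int) (e : String) :
    (PySem.List.enumerate xs s).filterMap (fun p => if p.2 = e then some p.1 else none)
      = occFrom s xs e := by
  induction xs generalizing s with
  | nil => simp [occFrom]
  | cons w ws ih =>
    rw [PySem.List.enumerate_cons]
    by_cases h : w = e <;> simp [occFrom, h, ih]

theorem occ_getD (ans : List String) (e : String) :
    (lookOcc ans).getD e [] = occFrom 0 ans e := by
  rw [lookOcc, fold_getD, filterMap_enumerate]; simp

theorem headGE (xs : List String) (n p : Int) (e : String) (h : p ≤ n) :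
    lookFirstGE (occFrom n xs e) p = (occFrom n xs e).head? := by
  induction xs generalizing n with
  | nil => simp [occFrom, lookFirstGE]
  | cons w ws ih =>
    by_cases hw : w = e
    · simp [occFrom, hw, lookFirstGE, h]
    · simpa [occFrom, hw] using ih (n + 1) (by omega)

theorem firstGE_drop (xs : List String) (n : Int) (p : Nat) (e : String) :
    lookFirstGE (occFrom n xs e) (n + p) = lookFirstGE (occFrom (n + p) (xs.drop p) e) (n + p) := by
  induction xs generalizing n p with
  | nil => simp [occFrom, lookFirstGE]
  | cons w ws ih =>
    cases p with
    | zero => norm_num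
    | succ q =>
      have step : lookFirstGE (occFrom n (w :: ws) e) (n + (q + 1 : Nat))
          = lookFirstGE (occFrom (n + 1) ws e) (n + (q + 1 : Nat)) := by
        by_cases hw : w = e
        · simp [occFrom, hw, lookFirstGE, show ¬ (n + ((q : Int) + 1) ≤ n) by omega]
        · simp [occFrom, hw]
      rw [step]
      have := ih (n + 1) q
      have harith : (n + 1) + (q : Int) = n + ((q : Nat) + 1 : Nat) := by push_cast; ring
      rw [harith] at this
      rw [this]
      simp

theorem consume_occ (xs : List String) (n : Int) (e : String) :
    (match (occFrom n xs e).head? with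
     | none => lookConsume xs e = none
     | some i => ∃ j : Nat, i = n + j ∧ lookConsume xs e = some (xs.drop (j + 1))) := by
  induction xs generalizing n with
  | nil => simp [occFrom, lookConsume]
  | cons w ws ih =>
    by_cases hw : w = e
    · simp only [occFrom, hw]
      exact ⟨0, by simp, by simp [lookConsume]⟩
    · simp only [occFrom, if_neg hw, List.nil_append]
      have := ih (n + 1)
      cases hh : (occFrom (n + 1) ws e).head? with
      | none => rw [hh] at this; simpa [lookConsume, hw] using this
      | some i =>
        rw [hh] at this
        obtain ⟨j, hij, hc⟩ := this
        exact ⟨j + 1, by push_cast at hij ⊢; omega, by simp [lookConsume, hw, hc]⟩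

theorem main_loop (r : List String) (ans0 : List String) (p : Nat) :
    look_matches (ans0.drop p) r = lookLoop (lookOcc ans0) r (p : Int) := by
  induction r generalizing p with
  | nil => simp [look_matches, lookLoop]
  | cons e rest ih =>
    have hocc : (lookOcc ans0).getD e [] = occFrom 0 ans0 e := occ_getD ans0 e
    have hdrop : lookFirstGE (occFrom 0 ans0 e) (p : Int)
        = (occFrom (p : Int) (ans0.drop p) e).head? := by
      have h1 := firstGE_drop ans0 0 p e
      simp only [zero_add] at h1
      rw [h1, headGE _ _ _ _ le_rfl]
    have hco := consume_occ (ans0.drop p) (p : Int) e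
    cases hh : (occFrom (p : Int) (ans0.drop p) e).head? with
    | none =>
      rw [hh] at hco
      simp [look_matches, lookLoop, hocc, hdrop, hh, hco]
    | some i =>
      rw [hh] at hco
      obtain ⟨j, hij, hc⟩ := hco
      have : (ans0.drop p).drop (j + 1) = ans0.drop (p + (j + 1)) := by
        rw [List.drop_drop]
      rw [this] at hc
      have hrec := ih (p + (j + 1))
      simp only [look_matches, lookLoop, hocc, hdrop, hh, hc]
      rw [hrec]
      congr 1
      push_cast
      omega

-- ===== VERDICT =====
theorem look_matches_spec : Claim_equal_look_matches := by
  intro ans r_answer _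
  unfold Spec_look_matches look_matches_alt
  have := main_loop r_answer ans 0
  simpa using this
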